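-- pv_equiv track=rewrite | github.com/anonyanony0/PLDock | PLDock/utils/io_tools.py | concat_lists
-- ===== SOURCE A (Python) =====
-- def concat_lists(alists, remove_repetition=False):
--     """
--     It takes a list of lists and returns a list of all the elements in the lists
--
--     :param alists: a list of lists
--     :param remove_repetition: if True, the function will remove any repetition in the list, defaults to
--     False (optional)
--     :return: A list of all the elements in the list of lists.
--     """
--     new_list = []
--     for i in alists:
--         if remove_repetition:
--             for j in i:
--                 if j not in new_list:
--                     new_list.append(j)
--         else:
--             new_list += i
--     return new_list
-- ===== SOURCE B (Python) =====
-- def concat_lists(alists, remove_repetition=False):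
--     """Flatten a list of lists; optionally dedup preserving first-occurrence order."""
--     flat = []
--     for sub in alists:
--         flat += sub
--     if remove_repetition:
--         return list(dict.fromkeys(flat))
--     return flat
-- ===== Notes on version B (the rewrite author's own statement) =====
-- stated objective: simpler
-- what changed: Replaces A's single nested loop with an inline membership-scan branch by two separate passes: one plain flattening loop, then an ordered dedup via dict.fromkeys only when requested.
import Mathlib
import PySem

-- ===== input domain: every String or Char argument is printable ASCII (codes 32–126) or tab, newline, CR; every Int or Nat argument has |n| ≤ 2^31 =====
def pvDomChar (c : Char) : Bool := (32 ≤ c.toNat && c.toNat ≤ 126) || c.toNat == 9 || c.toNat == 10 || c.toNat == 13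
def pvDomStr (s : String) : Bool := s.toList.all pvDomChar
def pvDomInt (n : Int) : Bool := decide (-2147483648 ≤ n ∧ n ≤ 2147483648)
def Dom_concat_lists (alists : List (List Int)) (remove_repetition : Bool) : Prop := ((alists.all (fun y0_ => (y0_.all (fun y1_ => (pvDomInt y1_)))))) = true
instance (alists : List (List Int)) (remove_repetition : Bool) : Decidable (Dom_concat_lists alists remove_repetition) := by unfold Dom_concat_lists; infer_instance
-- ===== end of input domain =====

-- B flattens in one pass and then dedups (when asked) in a separate pass via dict.fromkeys; same return value as A ('simpler' decomposition).

-- ===== PORT A =====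
def concat_lists (alists : List (List Int)) (remove_repetition : Bool) : List Int :=
  alists.foldl (fun new_list i =>
    if remove_repetition then
      i.foldl (fun nl j => if j ∈ nl then nl else nl ++ [j]) new_list
    else
      new_list ++ i) []

-- ===== PORT B =====
def concat_lists_alt (alists : List (List Int)) (remove_repetition : Bool) : List Int :=
  let flat := alists.foldl (fun acc sub => acc ++ sub) []
  if remove_repetition then PySem.List.dedup flat else flat

-- ===== PRECONDITION & SPEC =====
def Spec_concat_lists (alists : List (List Int)) (remove_repetition : Bool) (out : List Int) : Prop := out = concat_lists_alt alists remove_repetition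
instance (alists : List (List Int)) (remove_repetition : Bool) (out : List Int) : Decidable (Spec_concat_lists alists remove_repetition out) := by unfold Spec_concat_lists; infer_instance

-- ===== CLAIM (what is proved, stated in full; the proofs are below) =====
def Claim_equal_concat_lists : Prop := ∀ (alists : List (List Int)) (remove_repetition : Bool), Dom_concat_lists alists remove_repetition → Spec_concat_lists alists remove_repetition (concat_lists alists remove_repetition)

-- ===== LEMMAS AND PROOFS =====

-- B's flattening loop builds the flatten of the input.
theorem foldl_append_eq_flatten (xs : List (List Int)) (acc : List Int) :
    xs.foldl (fun a b => a ++ b) acc = acc ++ xs.flatten := by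
  induction xs generalizing acc with
  | nil => simp
  | cons h t ih => simp [List.foldl_cons, ih]

-- A's inner append-if-not-member step is exactly PySem.Set.add.
theorem step_eq_set_add :
    (fun (nl : List Int) j => if j ∈ nl then nl else nl ++ [j]) = PySem.Set.add := by
  funext nl j; simp [PySem.Set.add]

-- ===== VERDICT (by name: the statement is the Claim_ definition above) =====
theorem concat_lists_spec : Claim_equal_concat_lists := by
  intro alists rr _
  unfold Spec_concat_lists concat_lists concat_lists_alt
  cases rr with
  | false => simp
  | true =>
      simp only [if_true, step_eq_set_add,
        PySem.List.dedup, PySem.Set.ofList, ← List.foldl_flatten,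
        foldl_append_eq_flatten, List.nil_append]
      rfl
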